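-- pv_equiv track=rewrite | github.com/NiclasEriksen/importANT | river.py | grid_line
-- ===== SOURCE A (Python) =====
-- def grid_line(p0, p1):
--     x0, y0 = p0
--     x1, y1 = p1
--     dx = abs(x1 - x0)
--     dy = abs(y1 - y0)
--     x = x0
--     y = y0
--     n = 1 + dx + dy
--     points = []
--     if x1 > x0:
--         x_inc = 1
--     else:
--         x_inc = -1
--     if y1 > y0:
--         y_inc = 1
--     else:
--         y_inc = -1
--     error = dx - dy
--     dx *= 2
--     dy *= 2
--
--     while n > 0:
--         points.append((x, y))
--
--         if error > 0:
--             x += x_inc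
--             error -= dy
--         else:
--             y += y_inc
--             error += dx
--         n -= 1
--
--     return points
-- ===== SOURCE B (Python) =====
-- def _col_stop(dx, dy, a):
--     # index of the y-step at which the walk leaves column a (dy for the last column)
--     if a < dx:
--         return min(dy, max(0, ((2 * a + 1) * dy - dx) // (2 * dx) + 1))
--     return dy
--
--
-- def grid_line(p0, p1):
--     x0, y0 = p0
--     x1, y1 = p1
--     dx = abs(x1 - x0)
--     dy = abs(y1 - y0)
--     x_inc = 1 if x1 > x0 else -1
--     y_inc = 1 if y1 > y0 else -1
--     points = []
--     prev = 0
--     for a in range(dx + 1):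
--         cur = _col_stop(dx, dy, a)
--         points += [(x0 + a * x_inc, y0 + b * y_inc) for b in range(prev, cur + 1)]
--         prev = cur
--     return points
-- ===== Notes on version B (the rewrite author's own statement) =====
-- stated objective: alternative
-- what changed: Replaces the per-point Bresenham error-accumulator walk with a run-length column decomposition: for each x-column the closing y-index is computed in closed form by a floor division and the whole vertical run is emitted at once.
import Mathlib
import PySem

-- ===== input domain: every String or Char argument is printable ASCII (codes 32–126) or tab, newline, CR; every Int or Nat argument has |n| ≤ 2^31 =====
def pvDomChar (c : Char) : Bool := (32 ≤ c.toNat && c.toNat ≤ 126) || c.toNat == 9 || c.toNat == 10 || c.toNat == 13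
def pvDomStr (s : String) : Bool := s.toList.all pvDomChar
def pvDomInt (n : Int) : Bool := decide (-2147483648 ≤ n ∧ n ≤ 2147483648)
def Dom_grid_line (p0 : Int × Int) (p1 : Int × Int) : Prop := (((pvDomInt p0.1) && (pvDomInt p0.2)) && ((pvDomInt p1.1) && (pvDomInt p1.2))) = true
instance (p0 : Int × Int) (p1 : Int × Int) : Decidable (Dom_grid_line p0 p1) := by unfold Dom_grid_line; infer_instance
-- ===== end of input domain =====

-- B replaces A's per-point error-accumulator walk with a run-length column decomposition (closed-form column stops); alternative algorithm, same cost.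


-- ===== PORT A =====
-- A's while-loop: n counts down from 1+dx+dy (≥ 1), so it is a fuel recursion on n.toNat.
def gridLoopA (n : Nat) (x y x_inc y_inc dx2 dy2 error : Int) : List (Int × Int) :=
  match n with
  | 0 => []
  | Nat.succ m =>
    (x, y) ::
      (if error > 0 then
        gridLoopA m (x + x_inc) y x_inc y_inc dx2 dy2 (error - dy2)
      else
        gridLoopA m x (y + y_inc) x_inc y_inc dx2 dy2 (error + dx2))

def grid_line (p0 : Int × Int) (p1 : Int × Int) : List (Int × Int) :=
  let x0 := p0.1; let y0 := p0.2
  let x1 := p1.1; let y1 := p1.2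
  let dx := |x1 - x0|
  let dy := |y1 - y0|
  let n : Int := 1 + dx + dy
  let x_inc : Int := if x1 > x0 then 1 else -1
  let y_inc : Int := if y1 > y0 then 1 else -1
  let error := dx - dy
  gridLoopA n.toNat x0 y0 x_inc y_inc (dx * 2) (dy * 2) error

-- ===== PORT B =====
-- Source B helper _col_stop: the y-index at which the walk leaves column a (dy for the last column).
def colStop (dx dy a : Int) : Int :=
  if a < dx then min dy (max 0 (PySem.Int.floordiv ((2 * a + 1) * dy - dx) (2 * dx) + 1)) else dy

def grid_line_alt (p0 : Int × Int) (p1 : Int × Int) : List (Int × Int) :=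
  let x0 := p0.1; let y0 := p0.2
  let x1 := p1.1; let y1 := p1.2
  let dx := |x1 - x0|
  let dy := |y1 - y0|
  let x_inc : Int := if x1 > x0 then 1 else -1
  let y_inc : Int := if y1 > y0 then 1 else -1
  ((PySem.List.pyRange 0 (dx + 1) 1).foldl
    (fun (st : List (Int × Int) × Int) (a : Int) =>
      (st.1 ++ (PySem.List.pyRange st.2 (colStop dx dy a + 1) 1).map
          (fun b => (x0 + a * x_inc, y0 + b * y_inc)),
       colStop dx dy a))
    ([], 0)).1

-- ===== PRECONDITION & SPEC =====
def Spec_grid_line (p0 : Int × Int) (p1 : Int × Int) (out : List (Int × Int)) : Prop := out = grid_line_alt p0 p1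
instance (p0 : Int × Int) (p1 : Int × Int) (out : List (Int × Int)) : Decidable (Spec_grid_line p0 p1 out) := by unfold Spec_grid_line; infer_instance

-- ===== CLAIM (what is proved, stated in full; the proofs are below) =====
def Claim_equal_grid_line : Prop := ∀ (p0 : Int × Int) (p1 : Int × Int), Dom_grid_line p0 p1 → Spec_grid_line p0 p1 (grid_line p0 p1)

-- ===== LEMMAS AND PROOFS =====

-- Intermediate form of A's walk: two step counters a, b instead of position/error state.
def gridLoopC (n : Nat) (x0 y0 x_inc y_inc dx dy a b : Int) : List (Int × Int) :=
  match n with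
  | 0 => []
  | Nat.succ m =>
    (x0 + a * x_inc, y0 + b * y_inc) ::
      (if dx * (2 * b + 1) > dy * (2 * a + 1) then
        gridLoopC m x0 y0 x_inc y_inc dx dy (a + 1) b
      else
        gridLoopC m x0 y0 x_inc y_inc dx dy a (b + 1))

-- A's state after a x-steps and b y-steps: x = x0+a*xi, y = y0+b*yi, error = dx(2b+1) - dy(2a+1).
theorem gridLoopA_eq_C (n : Nat) (x0 y0 x_inc y_inc dx dy : Int) :
    ∀ a b : Int,
      gridLoopA n (x0 + a * x_inc) (y0 + b * y_inc) x_inc y_inc (dx * 2) (dy * 2)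
        (dx * (2 * b + 1) - dy * (2 * a + 1)) =
      gridLoopC n x0 y0 x_inc y_inc dx dy a b := by
  induction n with
  | zero => intro a b; rfl
  | succ m ih =>
    intro a b
    simp only [gridLoopA, gridLoopC, sub_pos]
    by_cases h : dx * (2 * b + 1) > dy * (2 * a + 1)
    · rw [if_pos h, if_pos h]
      have e1 : x0 + a * x_inc + x_inc = x0 + (a + 1) * x_inc := by ring
      have e2 : dx * (2 * b + 1) - dy * (2 * a + 1) - dy * 2
          = dx * (2 * b + 1) - dy * (2 * (a + 1) + 1) := by ring
      rw [e1, e2, ih]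
    · rw [if_neg h, if_neg h]
      have e1 : y0 + b * y_inc + y_inc = y0 + (b + 1) * y_inc := by ring
      have e2 : dx * (2 * b + 1) - dy * (2 * a + 1) + dx * 2
          = dx * (2 * (b + 1) + 1) - dy * (2 * a + 1) := by ring
      rw [e1, e2, ih]

-- Unclamped characterisation of the step decision via the floor division.
theorem cond_unclamped (dx dy a b : Int) (hdx : 0 < dx) :
    dx * (2 * b + 1) > dy * (2 * a + 1) ↔
      PySem.Int.floordiv ((2 * a + 1) * dy - dx) (2 * dx) + 1 ≤ b := by
  have h2 : (0 : Int) < 2 * dx := by omega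
  have h3 : (PySem.Int.floordiv ((2 * a + 1) * dy - dx) (2 * dx) + 1 ≤ b) ↔
      (PySem.Int.floordiv ((2 * a + 1) * dy - dx) (2 * dx) < b) := by omega
  rw [h3, PySem.Int.floordiv_lt_iff_lt_mul h2]
  constructor <;> intro h <;> nlinarith

theorem cond_iff (dx dy a b : Int) (hdy : 0 ≤ dy) (ha0 : 0 ≤ a) (ha : a < dx) (hb : 0 ≤ b) :
    dx * (2 * b + 1) > dy * (2 * a + 1) ↔ colStop dx dy a ≤ b := by
  have hdx : 0 < dx := by omega
  have hu := cond_unclamped dx dy a b hdx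
  have hdyb : PySem.Int.floordiv ((2 * a + 1) * dy - dx) (2 * dx) + 1 ≤ dy :=
    (cond_unclamped dx dy a dy hdx).mp
      (by nlinarith [mul_nonneg hdy (show (0 : Int) ≤ dx - a - 1 by omega)])
  rw [colStop, if_pos ha, hu]
  generalize hT : PySem.Int.floordiv ((2 * a + 1) * dy - dx) (2 * dx) = t at hdyb ⊢
  omega

-- In the last column (a = dx) the walk only ever steps in y.
theorem cond_false_last (dx dy b : Int) (hdx : 0 ≤ dx) (hb : 0 ≤ b) (hbdy : b < dy) :
    ¬ dx * (2 * b + 1) > dy * (2 * dx + 1) := by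
  exact not_lt.mpr (by nlinarith [mul_nonneg hdx (show (0 : Int) ≤ dy - b - 1 by omega)])

theorem colStop_nonneg (dx dy a : Int) (hdy : 0 ≤ dy) : 0 ≤ colStop dx dy a := by
  unfold colStop; split <;> omega

theorem colStop_le_dy (dx dy a : Int) : colStop dx dy a ≤ dy := by
  unfold colStop; split <;> omega

theorem colStop_mono (dx dy a : Int) (hdy : 0 ≤ dy) (ha0 : 0 ≤ a) (ha : a < dx) :
    colStop dx dy a ≤ colStop dx dy (a + 1) := by
  by_cases h : a + 1 < dx
  · have h2 : (0 : Int) < 2 * dx := by omega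
    have hm : PySem.Int.floordiv ((2 * a + 1) * dy - dx) (2 * dx) ≤
        PySem.Int.floordiv ((2 * (a + 1) + 1) * dy - dx) (2 * dx) := by
      rw [PySem.Int.floordiv_eq_ediv_of_pos h2, PySem.Int.floordiv_eq_ediv_of_pos h2]
      exact Int.ediv_le_ediv h2 (by nlinarith)
    rw [colStop, colStop, if_pos ha, if_pos h]
    omega
  · rw [colStop, colStop, if_pos ha, if_neg h]
    omega

-- The column list B emits, as a recursion over the remaining columns.
def colsFrom (x0 y0 x_inc y_inc dx dy : Int) (k : Nat) (a prev : Int) : List (Int × Int) :=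
  match k with
  | 0 => []
  | Nat.succ m =>
    (PySem.List.pyRange prev (colStop dx dy a + 1) 1).map
        (fun b => (x0 + a * x_inc, y0 + b * y_inc))
      ++ colsFrom x0 y0 x_inc y_inc dx dy m (a + 1) (colStop dx dy a)

-- The counter walk with exact fuel equals the column decomposition.
theorem loopC_eq_colsFrom (x0 y0 x_inc y_inc dx dy : Int) (hdx : 0 ≤ dx) (hdy : 0 ≤ dy) :
    ∀ (n : Nat) (a b : Int), 0 ≤ a → a ≤ dx → 0 ≤ b → b ≤ colStop dx dy a →
      (n : Int) = (dx - a) + (dy - b) + 1 →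
      gridLoopC n x0 y0 x_inc y_inc dx dy a b =
        colsFrom x0 y0 x_inc y_inc dx dy (dx - a + 1).toNat a b := by
  intro n
  induction n with
  | zero =>
    intro a b _ ha2 _ hb2 hn
    have := colStop_le_dy dx dy a
    omega
  | succ m ih =>
    intro a b ha1 ha2 hb1 hb2 hn
    have hbdy : b ≤ dy := le_trans hb2 (colStop_le_dy dx dy a)
    by_cases hlt : b < colStop dx dy a
    · -- y-step inside a column (only reachable with a < dx, where colStop < dy is possible,
      -- or a = dx and b < dy)
      have hcond : ¬ dx * (2 * b + 1) > dy * (2 * a + 1) := by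
        by_cases ha : a < dx
        · rw [cond_iff dx dy a b hdy ha1 ha hb1]; omega
        · have hax : a = dx := by omega
          have hcd : colStop dx dy a = dy := by rw [hax, colStop, if_neg (lt_irrefl dx)]
          rw [hax]
          exact cond_false_last dx dy b hdx hb1 (by omega)
      rw [gridLoopC, if_neg hcond]
      rw [ih a (b + 1) ha1 ha2 (by omega) (by omega) (by omega)]
      have hk : (dx - a + 1).toNat = (dx - (a + 1) + 1).toNat + 1 := by omega
      rw [hk, colsFrom, colsFrom]
      rw [PySem.List.pyRange_one_cons (by omega : b < colStop dx dy a + 1)]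
      simp
    · have hbe : b = colStop dx dy a := by omega
      by_cases ha : a < dx
      · -- x-step: close column a and move to column a+1
        have hcond : dx * (2 * b + 1) > dy * (2 * a + 1) := by
          rw [cond_iff dx dy a b hdy ha1 ha hb1]; omega
        rw [gridLoopC, if_pos hcond]
        rw [ih (a + 1) b (by omega) (by omega) hb1
            (by rw [hbe]; exact colStop_mono dx dy a hdy ha1 ha) (by omega)]
        have hk : (dx - a + 1).toNat = (dx - (a + 1) + 1).toNat + 1 := by omega
        rw [hk, colsFrom, ← hbe]
        rw [PySem.List.pyRange_one_singleton]
        simp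
      · -- terminal point (a = dx, b = dy)
        have hax : a = dx := by omega
        have hcd : colStop dx dy a = dy := by rw [hax, colStop, if_neg (lt_irrefl dx)]
        have hm0 : m = 0 := by omega
        subst hm0
        have hk : (dx - a + 1).toNat = 1 := by omega
        rw [hk, colsFrom, colsFrom]
        rw [show colStop dx dy a + 1 = b + 1 by omega, PySem.List.pyRange_one_singleton]
        simp [gridLoopC]

-- B's foldl over the column indices accumulates exactly colsFrom.
theorem foldl_eq_colsFrom (x0 y0 x_inc y_inc dx dy : Int) :
    ∀ (k : Nat) (a prev : Int) (acc : List (Int × Int)), (k : Int) = dx + 1 - a →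
      ((PySem.List.pyRange a (dx + 1) 1).foldl
        (fun (st : List (Int × Int) × Int) (c : Int) =>
          (st.1 ++ (PySem.List.pyRange st.2 (colStop dx dy c + 1) 1).map
              (fun b => (x0 + c * x_inc, y0 + b * y_inc)),
           colStop dx dy c))
        (acc, prev)).1 = acc ++ colsFrom x0 y0 x_inc y_inc dx dy k a prev := by
  intro k
  induction k with
  | zero =>
    intro a prev acc hk
    rw [PySem.List.pyRange_one_eq_nil (by omega : dx + 1 ≤ a)]
    simp [colsFrom]
  | succ m ih =>
    intro a prev acc hk
    rw [PySem.List.pyRange_one_cons (by omega : a < dx + 1)]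
    simp only [List.foldl_cons]
    rw [ih (a + 1) (colStop dx dy a) _ (by omega)]
    simp [colsFrom]

-- ===== VERDICT (by name: the statement is the Claim_ definition above) =====
theorem grid_line_spec : Claim_equal_grid_line := by
  intro p0 p1 _
  unfold Spec_grid_line grid_line grid_line_alt
  set dx := |p1.1 - p0.1| with hdxd
  set dy := |p1.2 - p0.2| with hdyd
  have hdx : 0 ≤ dx := abs_nonneg _
  have hdy : 0 ≤ dy := abs_nonneg _
  set xi : Int := if p1.1 > p0.1 then 1 else -1
  set yi : Int := if p1.2 > p0.2 then 1 else -1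
  have hA : gridLoopA (1 + dx + dy).toNat p0.1 p0.2 xi yi (dx * 2) (dy * 2) (dx - dy) =
      gridLoopC (1 + dx + dy).toNat p0.1 p0.2 xi yi dx dy 0 0 := by
    have h := gridLoopA_eq_C (1 + dx + dy).toNat p0.1 p0.2 xi yi dx dy 0 0
    simpa using h
  rw [hA]
  rw [loopC_eq_colsFrom p0.1 p0.2 xi yi dx dy hdx hdy (1 + dx + dy).toNat 0 0 le_rfl hdx
      le_rfl (colStop_nonneg dx dy 0 hdy) (by omega)]
  rw [foldl_eq_colsFrom p0.1 p0.2 xi yi dx dy (dx + 1).toNat 0 0 [] (by omega)]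
  simp
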